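-- pv_equiv track=rewrite | github.com/haraprasad-dash/AI_TESTCASE_GENERATOR | backend/app/services/review_service.py | _line_reference_for_tokens
-- ===== SOURCE A (Python) =====
-- from typing import Any, Dict, List, Tuple
--
-- def _line_reference_for_tokens(guide_lines: List[Tuple[int, str]], tokens: Tuple[str, ...]) -> str:
--     lowered_tokens = tuple(t.lower() for t in tokens if t)
--     if not lowered_tokens:
--         return "Not found in extracted text"
--
--     for line_number, line in guide_lines:
--         lowered_line = line.lower()
--         if all(token in lowered_line for token in lowered_tokens):
--             return f"L{line_number}"
--
--     for line_number, line in guide_lines: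
--         lowered_line = line.lower()
--         if any(token in lowered_line for token in lowered_tokens):
--             return f"L{line_number}"
--
--     return "Not found in extracted text"
-- ===== SOURCE B (Python) =====
-- def _line_reference_for_tokens(guide_lines, tokens):
--     lowered_tokens = tuple(t.lower() for t in tokens if t)
--     if not lowered_tokens:
--         return "Not found in extracted text"
--     k = len(lowered_tokens)
--     scored = [(n, sum(map(line.lower().__contains__, lowered_tokens)))
--               for n, line in guide_lines]
--     full = next((n for n, c in scored if c == k), None)
--     if full is not None:
--         return f"L{full}"
--     partial = next((n for n, c in scored if c > 0), None)
--     return f"L{partial}" if partial is not None else "Not found in extracted text"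
-- ===== Notes on version B (the rewrite author's own statement) =====
-- stated objective: alternative
-- what changed: Replaces A's two scans with repeated all/any substring tests by one scoring pass that materializes each line's matched-token count, then selects the first line whose count equals the token count, else the first with a positive count.
import Mathlib
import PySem

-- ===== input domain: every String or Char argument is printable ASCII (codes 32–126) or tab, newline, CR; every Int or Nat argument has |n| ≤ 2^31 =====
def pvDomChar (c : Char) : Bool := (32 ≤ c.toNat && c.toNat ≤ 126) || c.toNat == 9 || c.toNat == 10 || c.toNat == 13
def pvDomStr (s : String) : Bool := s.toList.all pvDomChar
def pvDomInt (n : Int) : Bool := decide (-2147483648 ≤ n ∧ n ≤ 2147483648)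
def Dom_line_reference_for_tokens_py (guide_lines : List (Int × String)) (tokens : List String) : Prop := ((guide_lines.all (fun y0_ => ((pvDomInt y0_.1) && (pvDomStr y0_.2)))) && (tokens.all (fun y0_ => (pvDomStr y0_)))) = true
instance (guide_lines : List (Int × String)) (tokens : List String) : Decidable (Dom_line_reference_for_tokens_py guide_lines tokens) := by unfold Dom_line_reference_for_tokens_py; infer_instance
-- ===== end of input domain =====

-- B replaces A's two scans (all-token pass, then any-token pass, each re-testing substrings)
-- with one scoring pass that materializes each line's matched-token count, then selects on the
-- counts (first count == k, else first count > 0); objective: alternative algorithm, same cost.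

-- ===== PORT A =====
-- second loop of A: first line containing ANY token
def pvA_loop2 (tks : List String) : List (Int × String) → String
  | [] => "Not found in extracted text"
  | (n, l) :: rest =>
    if tks.any (fun t => PySem.Str.isIn t (PySem.Str.lower l)) then "L" ++ PySem.Int.toStr n
    else pvA_loop2 tks rest

-- first loop of A: first line containing ALL tokens; falls through to the second loop over the full list
def pvA_loop1 (tks : List String) (full : List (Int × String)) : List (Int × String) → String
  | [] => pvA_loop2 tks full
  | (n, l) :: rest =>
    if tks.all (fun t => PySem.Str.isIn t (PySem.Str.lower l)) then "L" ++ PySem.Int.toStr n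
    else pvA_loop1 tks full rest

def line_reference_for_tokens_py (guide_lines : List (Int × String)) (tokens : List String) : String :=
  let lowered_tokens := (tokens.filter (fun t => t ≠ "")).map PySem.Str.lower
  if lowered_tokens = [] then "Not found in extracted text"
  else pvA_loop1 lowered_tokens guide_lines guide_lines

-- ===== PORT B =====
-- scoring pass: each line becomes (its line number, how many tokens it contains)
def pvB_score (tks : List String) (guide_lines : List (Int × String)) : List (Int × Nat) :=
  guide_lines.map (fun p =>
    (p.1, tks.countP (fun t => PySem.Str.isIn t (PySem.Str.lower p.2))))

def line_reference_for_tokens_py_alt (guide_lines : List (Int × String)) (tokens : List String) : String :=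
  let lowered_tokens := (tokens.filter (fun t => t ≠ "")).map PySem.Str.lower
  if lowered_tokens = [] then "Not found in extracted text"
  else
    let k := lowered_tokens.length
    let scored := pvB_score lowered_tokens guide_lines
    match scored.find? (fun q => q.2 == k) with
    | some q => "L" ++ PySem.Int.toStr q.1
    | none =>
      match scored.find? (fun q => 0 < q.2) with
      | some q => "L" ++ PySem.Int.toStr q.1
      | none => "Not found in extracted text"

-- ===== PRECONDITION & SPEC =====
def Spec_line_reference_for_tokens_py (guide_lines : List (Int × String)) (tokens : List String) (out : String) : Prop := out = line_reference_for_tokens_py_alt guide_lines tokens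
instance (guide_lines : List (Int × String)) (tokens : List String) (out : String) : Decidable (Spec_line_reference_for_tokens_py guide_lines tokens out) := by unfold Spec_line_reference_for_tokens_py; infer_instance

-- ===== CLAIM (what is proved, stated in full; the proofs are below) =====
def Claim_equal_line_reference_for_tokens_py : Prop := ∀ (guide_lines : List (Int × String)) (tokens : List String), Dom_line_reference_for_tokens_py guide_lines tokens → Spec_line_reference_for_tokens_py guide_lines tokens (line_reference_for_tokens_py guide_lines tokens)

-- ===== LEMMAS AND PROOFS =====

-- a full count (countP = length) is the same Boolean test as `all`
theorem pv_countP_full {α : Type} (l : List α) (p : α → Bool) :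
    (l.countP p == l.length) = l.all p := by
  cases hb : l.all p with
  | true =>
    have h1 : l.countP p = l.length :=
      List.countP_eq_length.mpr (by simpa [List.all_eq_true] using hb)
    simp [h1]
  | false =>
    have h1 : l.countP p ≠ l.length := by
      intro hc
      have hall : ∀ a ∈ l, p a = true := List.countP_eq_length.mp hc
      rw [← List.all_eq_true] at hall
      rw [hall] at hb; cases hb
    simp [h1]

-- a positive count is the same Boolean test as `any`
theorem pv_countP_pos {α : Type} (l : List α) (p : α → Bool) :
    (decide (0 < l.countP p)) = l.any p := by
  cases hb : l.any p with
  | true =>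
    have h1 : 0 < l.countP p :=
      List.countP_pos_iff.mpr (by simpa [List.any_eq_true] using hb)
    simp [h1]
  | false =>
    have h1 : ¬ 0 < l.countP p := by
      intro hc
      have hany : ∃ a ∈ l, p a = true := List.countP_pos_iff.mp hc
      rw [← List.any_eq_true] at hany
      rw [hany] at hb; cases hb
    simp [h1]

-- B's selection on count == k is A's first loop (falling back to the any-selection on the full list)
theorem pvB_full_sel_eq (tks : List String) (full lines : List (Int × String)) :
    (match (pvB_score tks lines).find? (fun q => q.2 == tks.length) with
      | some q => "L" ++ PySem.Int.toStr q.1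
      | none =>
        match (pvB_score tks full).find? (fun q => 0 < q.2) with
        | some q => "L" ++ PySem.Int.toStr q.1
        | none => "Not found in extracted text") = pvA_loop1 tks full lines := by
  induction lines with
  | nil =>
    simp only [pvB_score, List.map_nil, List.find?_nil, pvA_loop1]
    -- remaining: the any-selection over `full` equals pvA_loop2
    induction full with
    | nil => rfl
    | cons p rest ih =>
      obtain ⟨n, l⟩ := p
      simp only [List.map_cons] at ih ⊢
      cases h : tks.any (fun t => PySem.Str.isIn t (PySem.Str.lower l)) with
      | true =>
        rw [List.find?_cons_of_pos (by simp only []; rw [pv_countP_pos]; exact h)]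
        simp only [pvA_loop2, h, if_true]
      | false =>
        rw [List.find?_cons_of_neg (by simp only []; rw [pv_countP_pos, h]; exact Bool.false_ne_true)]
        simp only [pvA_loop2, h, Bool.false_eq_true, if_false]
        exact ih
  | cons p rest ih =>
    obtain ⟨n, l⟩ := p
    simp only [pvB_score, List.map_cons] at ih ⊢
    cases h : tks.all (fun t => PySem.Str.isIn t (PySem.Str.lower l)) with
    | true =>
      rw [List.find?_cons_of_pos (by simp only []; rw [pv_countP_full]; exact h)]
      simp only [pvA_loop1, h, if_true]
    | false =>
      rw [List.find?_cons_of_neg (by simp only []; rw [pv_countP_full, h]; exact Bool.false_ne_true)]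
      simp only [pvA_loop1, h, Bool.false_eq_true, if_false]
      exact ih

-- ===== VERDICT (by name: the statement is the Claim_ definition above) =====
theorem line_reference_for_tokens_py_spec : Claim_equal_line_reference_for_tokens_py := by
  intro guide_lines tokens _
  unfold Spec_line_reference_for_tokens_py
  simp only [line_reference_for_tokens_py, line_reference_for_tokens_py_alt]
  by_cases h : (tokens.filter (fun t => t ≠ "")).map PySem.Str.lower = []
  · rw [if_pos h, if_pos h]
  · rw [if_neg h, if_neg h, pvB_full_sel_eq]
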